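-- pv_equiv track=rewrite | github.com/YuchenLi27/MechineLearningProject | src/pipeline_preview.py | make_switch_and_duration
-- ===== SOURCE A (Python) =====
-- def make_switch_and_duration(langs, small_max=2, med_max=5):
--     """
--     改进版：
--     - switch_next[t]：比较“当前位置 t 的最近非 other 语言”和“t 后面第一个非 other 语言”
--       如果不同，则认为在 t 处预测到了下一次切换。
--     - duration3[t]：只在 switch 点定义：从“下一个非 other token”开始的新语言段长度（只数非 other）
--     """
--     n = len(langs)
--     switch_next = [-100] * n
--     dur3 = [-100] * n
--
--     # 先预处理：每个位置 i 右侧第一个非 other 的位置 next_non_other[i]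
--     next_non_other = [-1] * n
--     nxt = -1
--     for i in range(n - 1, -1, -1):
--         next_non_other[i] = nxt
--         if langs[i] != "other":
--             nxt = i
--
--     # 再预处理：每个位置 i 左侧最近非 other 的语言 prev_lang[i]
--     prev_lang = ["other"] * n
--     last = "other"
--     for i in range(n):
--         if langs[i] != "other":
--             last = langs[i]
--         prev_lang[i] = last
--
--     for t in range(n):
--         if prev_lang[t] == "other":
--             switch_next[t] = 0
--             continue
--
--         j = next_non_other[t]  # t 右侧第一个非 other token
--         if j == -1:
--             switch_next[t] = -100
--             continue
--
--         next_lang = langs[j]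
--         sw = int(prev_lang[t] != next_lang)
--         switch_next[t] = sw
--
--         if sw == 1:
--             # 从 j 开始数新语言段长度（只数非 other）
--             L = 0
--             k = j
--             while k < n:
--                 if langs[k] == "other":
--                     k += 1
--                     continue
--                 if langs[k] != next_lang:
--                     break
--                 L += 1
--                 k += 1
--
--             if L <= small_max:
--                 dur3[t] = 0
--             elif L <= med_max:
--                 dur3[t] = 1
--             else:
--                 dur3[t] = 2
--
--     return switch_next, dur3
-- ===== SOURCE B (Python) =====
-- def make_switch_and_duration(langs, small_max=2, med_max=5):
--     # One backward pass memoizes, for every position, the language and (only-counting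
--     # non-"other") run length of the nearest non-"other" token strictly to the right,
--     # so the forward pass needs no rescans.
--     nxt = []          # built in reversed order: None or (lang, run_length)
--     cur = None        # nearest non-"other" at or after the scan point
--     for lang in reversed(langs):
--         nxt.append(cur)
--         if lang != "other":
--             run = 1 + (cur[1] if cur is not None and cur[0] == lang else 0)
--             cur = (lang, run)
--     nxt.reverse()
--     switch_next, dur3 = [], []
--     last = "other"
--     for lang, nx in zip(langs, nxt):
--         if lang != "other":
--             last = lang
--         if last == "other":
--             switch_next.append(0)
--             dur3.append(-100)
--         elif nx is None:
--             switch_next.append(-100)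
--             dur3.append(-100)
--         elif nx[0] == last:
--             switch_next.append(0)
--             dur3.append(-100)
--         else:
--             switch_next.append(1)
--             L = nx[1]
--             dur3.append(0 if L <= small_max else 1 if L <= med_max else 2)
--     return switch_next, dur3
-- ===== Notes on version B (the rewrite author's own statement) =====
-- stated objective: alternative
-- what changed: replaces A's per-switch-point forward rescan (while loop over the rest of the list) by a single backward pass that memoizes, for each position, the language and run length of the nearest non-'other' token to the right, then one forward pass with no rescans or index arithmetic
import Mathlib
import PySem

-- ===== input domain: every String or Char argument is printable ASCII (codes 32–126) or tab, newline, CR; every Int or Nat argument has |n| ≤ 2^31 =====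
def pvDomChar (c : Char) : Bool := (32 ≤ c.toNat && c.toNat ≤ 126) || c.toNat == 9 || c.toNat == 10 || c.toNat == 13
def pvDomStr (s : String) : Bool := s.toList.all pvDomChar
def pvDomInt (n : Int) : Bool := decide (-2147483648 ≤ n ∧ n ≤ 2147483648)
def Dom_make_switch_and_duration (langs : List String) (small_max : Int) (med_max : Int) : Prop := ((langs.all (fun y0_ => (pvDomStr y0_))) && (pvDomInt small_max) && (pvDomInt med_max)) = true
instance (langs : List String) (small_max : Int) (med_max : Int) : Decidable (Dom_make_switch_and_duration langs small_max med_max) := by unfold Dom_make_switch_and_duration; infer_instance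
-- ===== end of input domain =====

-- B replaces A's per-switch-point forward rescan by one backward pass memoizing the
-- (language, run length) of the nearest non-"other" token to the right (alternative algorithm).

-- ===== PORT A =====
-- A's inner `while k < n` loop (counts the new-language segment length, skipping "other").
-- Indexing langs[k] via getD is exact here: the loop only reads positions with k < n.
def whileA (langs : List String) (nl : String) (k : Nat) (L : Int) : Int :=
  if _h : k < langs.length then
    if langs.getD k "" = "other" then whileA langs nl (k+1) L
    else if langs.getD k "" ≠ nl then L
    else whileA langs nl (k+1) (L+1)
  else L
termination_by langs.length - k

-- A's first (backward) loop: for each i ≥ off, next_non_other[i], plus the running nxt.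
def backA (langs : List String) (off : Nat) : List Int × Int :=
  if _h : off < langs.length then
    ((backA langs (off+1)).2 :: (backA langs (off+1)).1,
     if langs.getD off "" ≠ "other" then (off : Int) else (backA langs (off+1)).2)
  else ([], -1)
termination_by langs.length - off

-- A's second (forward) loop: prev_lang.
def prevA : List String → String → List String
  | [], _ => []
  | l :: rest, last =>
    (if l ≠ "other" then l else last) :: prevA rest (if l ≠ "other" then l else last)

-- body of A's main loop at position t, given prev_lang[t] and j = next_non_other[t]
-- (sw = int(pl != next_lang); dur only set when sw == 1; j ≥ 0 here, so j.toNat is exact)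
def stepA (langs : List String) (small_max med_max : Int) (pl : String) (j : Int) : Int × Int :=
  if pl = "other" then (0, -100)
  else if j = -1 then (-100, -100)
  else if pl ≠ langs.getD j.toNat "" then
    (1, if whileA langs (langs.getD j.toNat "") j.toNat 0 ≤ small_max then 0
        else if whileA langs (langs.getD j.toNat "") j.toNat 0 ≤ med_max then 1 else 2)
  else (0, -100)

def make_switch_and_duration (langs : List String) (small_max : Int) (med_max : Int) : List Int × List Int :=
  (((prevA langs "other").zip (backA langs 0).1).map (fun p => (stepA langs small_max med_max p.1 p.2).1),
   ((prevA langs "other").zip (backA langs 0).1).map (fun p => (stepA langs small_max med_max p.1 p.2).2))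

-- ===== PORT B =====
-- B's backward pass: for each position, none or (lang, run) of the nearest
-- non-"other" token strictly to the right (list returned in forward order).
def backB : List String → List (Option (String × Int)) × Option (String × Int)
  | [] => ([], none)
  | l :: rest =>
    ((backB rest).2 :: (backB rest).1,
     if l ≠ "other" then
       some (l, 1 + (match (backB rest).2 with
                     | some (cl, cr) => if cl = l then cr else 0
                     | none => 0))
     else (backB rest).2)

-- body of B's forward loop, given the updated `last` and the memo for this position
def stepB (small_max med_max : Int) (last' : String) (nx : Option (String × Int)) : Int × Int :=
  if last' = "other" then (0, -100)
  else
    match nx with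
    | none => (-100, -100)
    | some (nl, run) =>
      if nl = last' then (0, -100)
      else (1, if run ≤ small_max then 0 else if run ≤ med_max then 1 else 2)

-- B's forward pass, carrying `last` and building both output lists directly.
def fwdB (small_max med_max : Int) : List (String × Option (String × Int)) → String → List Int × List Int
  | [], _ => ([], [])
  | (l, nx) :: rest, last =>
    ((stepB small_max med_max (if l ≠ "other" then l else last) nx).1 ::
       (fwdB small_max med_max rest (if l ≠ "other" then l else last)).1,
     (stepB small_max med_max (if l ≠ "other" then l else last) nx).2 ::
       (fwdB small_max med_max rest (if l ≠ "other" then l else last)).2)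

def make_switch_and_duration_alt (langs : List String) (small_max : Int) (med_max : Int) : List Int × List Int :=
  fwdB small_max med_max (langs.zip (backB langs).1) "other"

-- ===== PRECONDITION & SPEC =====
def Spec_make_switch_and_duration (langs : List String) (small_max : Int) (med_max : Int) (out : List Int × List Int) : Prop := out = make_switch_and_duration_alt langs small_max med_max
instance (langs : List String) (small_max : Int) (med_max : Int) (out : List Int × List Int) : Decidable (Spec_make_switch_and_duration langs small_max med_max out) := by unfold Spec_make_switch_and_duration; infer_instance

-- ===== CLAIM (what is proved, stated in full; the proofs are below) =====
def Claim_equal_make_switch_and_duration : Prop := ∀ (langs : List String) (small_max : Int) (med_max : Int), Dom_make_switch_and_duration langs small_max med_max → Spec_make_switch_and_duration langs small_max med_max (make_switch_and_duration langs small_max med_max)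

-- ===== LEMMAS AND PROOFS =====

-- accumulator lemma for A's while loop
theorem whileA_acc (langs : List String) (nl : String) (k : Nat) (L : Int) :
    whileA langs nl k L = L + whileA langs nl k 0 := by
  suffices h : ∀ m k L, langs.length - k ≤ m → whileA langs nl k L = L + whileA langs nl k 0 from
    h (langs.length - k) k L le_rfl
  intro m
  induction m with
  | zero =>
    intro k L hm
    have hk : ¬ k < langs.length := by omega
    conv_lhs => rw [whileA]
    conv_rhs => rw [whileA]
    simp [hk]
  | succ m ih =>
    intro k L hm
    conv_lhs => rw [whileA]
    conv_rhs => rw [whileA]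
    by_cases hk : k < langs.length
    · simp only [dif_pos hk]
      split_ifs with h1 h2
      · exact ih (k+1) L (by omega)
      · omega
      · rw [ih (k+1) (L+1) (by omega), ih (k+1) (0+1) (by omega)]; omega
    · simp [hk]

-- joint characterization of A's nxt / while-count and B's memo state at offset `off`
theorem back_rel (langs : List String) (off : Nat) :
    ((backA langs off).2 = -1 ∧ (backB (langs.drop off)).2 = none ∧
       ∀ nl, whileA langs nl off 0 = 0)
    ∨ (∃ j : Nat, off ≤ j ∧ j < langs.length ∧ (backA langs off).2 = (j : Int) ∧
        langs.getD j "" ≠ "other" ∧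
        (backB (langs.drop off)).2 = some (langs.getD j "", whileA langs (langs.getD j "") j 0) ∧
        ∀ nl, whileA langs nl off 0 =
          if langs.getD j "" = nl then whileA langs nl j 0 else 0) := by
  suffices h : ∀ m off, langs.length - off ≤ m →
      ((backA langs off).2 = -1 ∧ (backB (langs.drop off)).2 = none ∧
         ∀ nl, whileA langs nl off 0 = 0)
      ∨ (∃ j : Nat, off ≤ j ∧ j < langs.length ∧ (backA langs off).2 = (j : Int) ∧
          langs.getD j "" ≠ "other" ∧
          (backB (langs.drop off)).2 = some (langs.getD j "", whileA langs (langs.getD j "") j 0) ∧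
          ∀ nl, whileA langs nl off 0 =
            if langs.getD j "" = nl then whileA langs nl j 0 else 0) from
    h (langs.length - off) off le_rfl
  intro m
  induction m with
  | zero =>
    intro off hm
    have hoff : ¬ off < langs.length := by omega
    have hnil : langs.drop off = [] := List.drop_eq_nil_of_le (by omega)
    left
    refine ⟨by rw [backA]; simp [hoff], by rw [hnil]; rfl, fun nl => by rw [whileA]; simp [hoff]⟩
  | succ m ih =>
    intro off hm
    by_cases hoff : off < langs.length
    · have hget : langs.getD off "" = langs[off] := List.getD_eq_getElem langs "" hoff
      have hdrop : langs.drop off = langs.getD off "" :: langs.drop (off+1) := by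
        rw [List.drop_eq_getElem_cons hoff, hget]
      by_cases hl : langs.getD off "" = "other"
      · -- position `off` is "other": all three quantities pass through to off+1
        have hA2 : (backA langs off).2 = (backA langs (off+1)).2 := by
          rw [backA]; simp only [dif_pos hoff]
          exact if_neg (not_not_intro hl)
        have hB2 : (backB (langs.drop off)).2 = (backB (langs.drop (off+1))).2 := by
          rw [hdrop]; simp only [backB]
          exact if_neg (not_not_intro hl)
        have hW : ∀ nl, whileA langs nl off 0 = whileA langs nl (off+1) 0 := by
          intro nl
          conv_lhs => rw [whileA]
          rw [dif_pos hoff, if_pos hl]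
        rcases ih (off+1) (by omega) with ⟨h1, h2, h3⟩ | ⟨j, hj1, hj2, hj3, hj4, hj5, hj6⟩
        · exact Or.inl ⟨hA2.trans h1, hB2.trans h2, fun nl => (hW nl).trans (h3 nl)⟩
        · exact Or.inr ⟨j, by omega, hj2, hA2.trans hj3, hj4, hB2.trans hj5,
            fun nl => (hW nl).trans (hj6 nl)⟩
      · -- position `off` is non-"other": it is itself the witness
        right
        have hw : whileA langs (langs.getD off "") off 0
            = 1 + whileA langs (langs.getD off "") (off+1) 0 := by
          conv_lhs => rw [whileA]
          rw [dif_pos hoff, if_neg hl, if_neg (not_not_intro rfl), whileA_acc]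
          omega
        refine ⟨off, le_rfl, hoff, ?_, hl, ?_, ?_⟩
        · rw [backA]; simp only [dif_pos hoff]
          exact if_pos hl
        · rw [hdrop]; simp only [backB]
          rw [if_pos hl]
          refine congrArg some (congrArg (Prod.mk _) ?_)
          rw [hw]
          rcases ih (off+1) (by omega) with ⟨h1, h2, h3⟩ | ⟨j, hj1, hj2, hj3, hj4, hj5, hj6⟩
          · simp only [h2]
            rw [h3]
          · simp only [hj5]
            rw [hj6 (langs.getD off "")]
            split_ifs with he
            · rw [he]
            · rfl
        · intro nl
          by_cases hnl : langs.getD off "" = nl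
          · rw [if_pos hnl]
          · rw [if_neg hnl]
            conv_lhs => rw [whileA]
            rw [dif_pos hoff, if_neg hl, if_pos hnl]
    · have hnil : langs.drop off = [] := List.drop_eq_nil_of_le (by omega)
      left
      refine ⟨by rw [backA]; simp [hoff], by rw [hnil]; rfl, fun nl => by rw [whileA]; simp [hoff]⟩

-- the two loop bodies agree on related data
theorem step_rel (langs : List String) (small_max med_max : Int) (last' : String) (off : Nat) :
    stepB small_max med_max last' (backB (langs.drop off)).2
      = stepA langs small_max med_max last' (backA langs off).2 := by
  rcases back_rel langs off with ⟨h1, h2, _⟩ | ⟨j, _, hj2, hj3, hj4, hj5, _⟩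
  · rw [h1, h2]
    by_cases hlast : last' = "other" <;> simp [stepA, stepB, hlast]
  · rw [hj3, hj5]
    have hne : ((j : Nat) : Int) ≠ -1 := by omega
    have htn : ((j : Nat) : Int).toNat = j := by omega
    by_cases hlast : last' = "other"
    · simp [stepA, stepB, hlast]
    · by_cases he : langs.getD j "" = last'
      · have he' : last' = langs.getD j "" := he.symm
        simp [stepA, stepB, hne, htn, he']
      · have hne' : last' ≠ langs.getD j "" := fun h => he h.symm
        simp only [stepA, stepB, if_neg hlast, if_neg hne, htn, if_neg he]
        rw [if_pos hne']

-- main induction: A's main loop on the suffix from `off` equals B's forward pass there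
theorem main_eq (langs : List String) (small_max med_max : Int) (off : Nat) (last : String) :
    fwdB small_max med_max ((langs.drop off).zip ((backB (langs.drop off)).1)) last
      = ((((prevA (langs.drop off) last).zip ((backA langs off).1)).map
            (fun p => (stepA langs small_max med_max p.1 p.2).1)),
         (((prevA (langs.drop off) last).zip ((backA langs off).1)).map
            (fun p => (stepA langs small_max med_max p.1 p.2).2))) := by
  suffices h : ∀ m off last, langs.length - off ≤ m →
      fwdB small_max med_max ((langs.drop off).zip ((backB (langs.drop off)).1)) last
        = ((((prevA (langs.drop off) last).zip ((backA langs off).1)).map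
              (fun p => (stepA langs small_max med_max p.1 p.2).1)),
           (((prevA (langs.drop off) last).zip ((backA langs off).1)).map
              (fun p => (stepA langs small_max med_max p.1 p.2).2))) from
    h (langs.length - off) off last le_rfl
  intro m
  induction m with
  | zero =>
    intro off last hm
    have hoff : ¬ off < langs.length := by omega
    have hnil : langs.drop off = [] := List.drop_eq_nil_of_le (by omega)
    have hb : backA langs off = ([], -1) := by rw [backA]; simp [hoff]
    rw [hnil, hb]
    rfl
  | succ m ih =>
    intro off last hm
    by_cases hoff : off < langs.length
    · have hget : langs.getD off "" = langs[off] := List.getD_eq_getElem langs "" hoff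
      have hdrop : langs.drop off = langs.getD off "" :: langs.drop (off+1) := by
        rw [List.drop_eq_getElem_cons hoff, hget]
      have hA1 : (backA langs off).1 = (backA langs (off+1)).2 :: (backA langs (off+1)).1 := by
        rw [backA]; simp only [dif_pos hoff]
      rw [hdrop, hA1]
      simp only [backB, List.zip_cons_cons, fwdB, prevA, List.map_cons]
      rw [step_rel langs small_max med_max _ (off+1),
        ih (off+1) (if langs.getD off "" ≠ "other" then langs.getD off "" else last) (by omega)]
    · have hnil : langs.drop off = [] := List.drop_eq_nil_of_le (by omega)
      have hb : backA langs off = ([], -1) := by rw [backA]; simp [hoff]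
      rw [hnil, hb]
      rfl

-- ===== VERDICT (by name: the statement is the Claim_ definition above) =====
theorem make_switch_and_duration_spec : Claim_equal_make_switch_and_duration := by
  intro langs small_max med_max _
  unfold Spec_make_switch_and_duration make_switch_and_duration make_switch_and_duration_alt
  have h := main_eq langs small_max med_max 0 "other"
  simpa using h.symm
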